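-- pv_equiv track=rewrite | github.com/Mugamta/Boostcamp_AITech5_CV11 | 8.01/이준하_백준_25918_북극곰은_괄호를_찢어.py | check
-- ===== SOURCE A (Python) =====
-- def check(str,piv):
--     cnt = 0
--     max = 0
--     for word in str:
--         if piv == word:
--             cnt += 1
--             if max < cnt:
--                 max = cnt
--         else:
--             cnt -= 1
--     return max
-- ===== SOURCE B (Python) =====
-- def check(str, piv):
--     # Divide and conquer: for a segment s, solve(s) returns
--     # (balance sum of s, max(0, max prefix balance of s)); halves combine in O(1).
--     def solve(s):
--         if len(s) <= 1:
--             if not s: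
--                 return (0, 0)
--             d = 1 if s == piv else -1
--             return (d, max(0, d))
--         m = len(s) // 2
--         sl, bl = solve(s[:m])
--         sr, br = solve(s[m:])
--         return (sl + sr, max(bl, sl + br))
--     return solve(str)[1]
-- ===== Notes on version B (the rewrite author's own statement) =====
-- stated objective: alternative
-- what changed: Replaces the sequential running-count-with-max loop by a divide-and-conquer recursion that splits the string in half and combines (segment balance sum, clamped max prefix balance) pairs via max(bl, sl+br).
import Mathlib
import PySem

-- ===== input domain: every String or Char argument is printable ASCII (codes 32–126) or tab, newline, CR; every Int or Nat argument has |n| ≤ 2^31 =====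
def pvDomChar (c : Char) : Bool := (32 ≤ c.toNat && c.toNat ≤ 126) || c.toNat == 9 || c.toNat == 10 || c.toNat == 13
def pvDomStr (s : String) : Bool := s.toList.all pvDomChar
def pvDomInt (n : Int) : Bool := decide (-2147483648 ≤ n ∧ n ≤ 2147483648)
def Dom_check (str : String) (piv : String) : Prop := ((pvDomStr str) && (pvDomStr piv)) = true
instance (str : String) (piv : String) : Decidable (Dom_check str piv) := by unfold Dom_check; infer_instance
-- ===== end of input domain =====

-- B replaces A's sequential running-count-with-max loop by a divide-and-conquer recursion
-- combining (segment balance sum, clamped max prefix balance) pairs (alternative algorithm, same result).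

-- ===== PORT A =====
-- the for-loop of A over the characters of str, state (cnt, max)
def checkLoop (piv : String) : List Char → Int → Int → Int
  | [], _, mx => mx
  | c :: cs, cnt, mx =>
    if piv == String.ofList [c] then
      if mx < cnt + 1 then checkLoop piv cs (cnt + 1) (cnt + 1)
      else checkLoop piv cs (cnt + 1) mx
    else checkLoop piv cs (cnt - 1) mx

def check (str : String) (piv : String) : Int := checkLoop piv str.toList 0 0

-- ===== PORT B =====
-- B's combine step: (sl+sr, max(bl, sl+br))
def combine (pl pr : Int × Int) : Int × Int := (pl.1 + pr.1, max pl.2 (pl.1 + pr.2))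

-- B's recursive solve(s) = (balance sum, max(0, max prefix balance)), halves split at len//2;
-- fuel (= initial length) only makes the halving recursion structural, it is never exhausted
def solveGo : Nat → String → List Char → Int × Int
  | 0, _, _ => (0, 0)
  | fuel + 1, piv, l =>
    if l.length ≤ 1 then
      match l with
      | [] => (0, 0)
      | c :: _ =>
        let d : Int := if String.ofList [c] == piv then 1 else -1
        (d, max 0 d)
    else
      combine (solveGo fuel piv (l.take (l.length / 2)))
              (solveGo fuel piv (l.drop (l.length / 2)))

def check_alt (str : String) (piv : String) : Int :=
  (solveGo str.toList.length piv str.toList).2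

-- ===== PRECONDITION & SPEC =====
def Spec_check (str : String) (piv : String) (out : Int) : Prop := out = check_alt str piv
instance (str : String) (piv : String) (out : Int) : Decidable (Spec_check str piv out) := by unfold Spec_check; infer_instance

-- ===== CLAIM (what is proved, stated in full; the proofs are below) =====
def Claim_equal_check : Prop := ∀ (str : String) (piv : String), Dom_check str piv → Spec_check str piv (check str piv)

-- ===== LEMMAS AND PROOFS =====

-- max(0, max prefix sum) of a delta list
def pMax : List Int → Int
  | [] => 0
  | d :: ds => max 0 (d + pMax ds)

theorem pMax_nonneg (ds : List Int) : 0 ≤ pMax ds := by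
  cases ds with
  | nil => simp [pMax]
  | cons d ds => exact le_max_left 0 _

theorem pMax_append (a b : List Int) :
    pMax (a ++ b) = max (pMax a) (a.sum + pMax b) := by
  induction a with
  | nil =>
    have := pMax_nonneg b
    simp [pMax]; omega
  | cons d a ih =>
    have := pMax_nonneg a
    have := pMax_nonneg b
    simp only [List.cons_append, pMax, ih, List.sum_cons]
    omega

theorem solveGo_succ (fuel : Nat) (piv : String) (l : List Char) :
    solveGo (fuel + 1) piv l
      = if l.length ≤ 1 then
          (match l with
           | [] => ((0 : Int), (0 : Int))
           | c :: _ =>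
             ((if String.ofList [c] == piv then (1 : Int) else -1),
              max 0 (if String.ofList [c] == piv then (1 : Int) else -1)))
        else combine (solveGo fuel piv (l.take (l.length / 2)))
                     (solveGo fuel piv (l.drop (l.length / 2))) := rfl

theorem solveGo_eq (piv : String) (fuel : Nat) : ∀ (l : List Char), l.length ≤ fuel →
    solveGo fuel piv l
      = ((l.map (fun ch => if String.ofList [ch] == piv then (1 : Int) else -1)).sum,
         pMax (l.map (fun ch => if String.ofList [ch] == piv then (1 : Int) else -1))) := by
  induction fuel with
  | zero =>
    intro l hl
    have : l = [] := List.eq_nil_of_length_eq_zero (Nat.le_zero.mp hl)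
    subst this
    simp [solveGo, pMax]
  | succ fuel ih =>
    intro l hl
    rw [solveGo_succ]
    by_cases h : l.length ≤ 1
    · rw [if_pos h]
      match l with
      | [] => simp [pMax]
      | [c] => simp [pMax]
      | c :: c' :: cs => simp at h
    · rw [if_neg h]
      have h2 : 2 ≤ l.length := by omega
      rw [ih _ (by simp only [List.length_take]; omega),
          ih _ (by simp only [List.length_drop]; omega)]
      have hsplit : l = l.take (l.length / 2) ++ l.drop (l.length / 2) :=
        (List.take_append_drop _ _).symm
      have hmap : (l.map (fun ch => if String.ofList [ch] == piv then (1 : Int) else -1))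
          = (l.take (l.length / 2)).map (fun ch => if String.ofList [ch] == piv then (1 : Int) else -1)
            ++ (l.drop (l.length / 2)).map (fun ch => if String.ofList [ch] == piv then (1 : Int) else -1) := by
        conv_lhs => rw [hsplit]
        simp
      rw [hmap, pMax_append, List.sum_append]
      rfl

theorem checkLoop_eq (piv : String) (l : List Char) : ∀ (cnt mx : Int), cnt ≤ mx →
    checkLoop piv l cnt mx
      = max mx (cnt + pMax (l.map (fun ch => if String.ofList [ch] == piv then 1 else -1))) := by
  induction l with
  | nil => intro cnt mx h; simp [checkLoop, pMax]; omega
  | cons c cs ih =>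
    intro cnt mx h
    simp only [checkLoop, List.map, pMax]
    have hP := pMax_nonneg (cs.map (fun ch => if String.ofList [ch] == piv then 1 else -1))
    by_cases hc : piv = String.ofList [c]
    · have hb : (piv == String.ofList [c]) = true := by simp [hc]
      have hc' : (String.ofList [c] == piv) = true := by simp [hc]
      simp only [hb, hc', if_true]
      by_cases hm : mx < cnt + 1
      · rw [if_pos hm, ih (cnt + 1) (cnt + 1) le_rfl]; omega
      · rw [if_neg hm, ih (cnt + 1) mx (by omega)]; omega
    · have hb : (piv == String.ofList [c]) = false := by simp [hc]
      have hc' : (String.ofList [c] == piv) = false := by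
        simp only [beq_eq_false_iff_ne, ne_eq]; intro he; exact hc he.symm
      simp only [hb, hc', Bool.false_eq_true, if_false]
      rw [ih (cnt - 1) mx (by omega)]
      omega

-- ===== VERDICT (by name: the statement is the Claim_ definition above) =====
theorem check_spec : Claim_equal_check := by
  intro str piv _
  unfold Spec_check check check_alt
  rw [checkLoop_eq piv str.toList 0 0 le_rfl, solveGo_eq piv _ _ le_rfl]
  show max 0 (0 + pMax _) = pMax _
  rw [zero_add]
  exact max_eq_right (pMax_nonneg _)
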